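-- pv_equiv track=rewrite | github.com/MatthewPDingle/PokerAnalytics | analysis/.ipynb_checkpoints/cbet_utils-checkpoint.py | _has_flush_draw
-- ===== SOURCE A (Python) =====
-- from collections import Counter
-- from typing import Dict, Iterable, List, Sequence, Tuple
--
-- def _has_flush_draw(hole: List[Tuple[str, int, str]], board: List[Tuple[str, int, str]]) -> bool:
--     total = Counter()
--     hole_suits = Counter(s for s, _, _ in hole)
--     for s, _, _ in hole:
--         total[s] += 1
--     for s, _, _ in board:
--         total[s] += 1
--     return any(count >= 4 and hole_suits.get(suit, 0) > 0 for suit, count in total.items())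
-- ===== SOURCE B (Python) =====
-- def _has_flush_draw(hole, board):
--     suits = {s for s, _, _ in hole}
--     cards = hole + board
--     for suit in suits:
--         if sum(1 for s, _, _ in cards if s == suit) >= 4:
--             return True
--     return False
-- ===== Notes on version B (the rewrite author's own statement) =====
-- stated objective: simpler
-- what changed: B drops A's two Counter indexes entirely: it takes the distinct hole suits as a set and rescans hole+board once per candidate suit with an early return, instead of building a full suit-count index over all cards and filtering its items against a second hole-suit counter.
import Mathlib
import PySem

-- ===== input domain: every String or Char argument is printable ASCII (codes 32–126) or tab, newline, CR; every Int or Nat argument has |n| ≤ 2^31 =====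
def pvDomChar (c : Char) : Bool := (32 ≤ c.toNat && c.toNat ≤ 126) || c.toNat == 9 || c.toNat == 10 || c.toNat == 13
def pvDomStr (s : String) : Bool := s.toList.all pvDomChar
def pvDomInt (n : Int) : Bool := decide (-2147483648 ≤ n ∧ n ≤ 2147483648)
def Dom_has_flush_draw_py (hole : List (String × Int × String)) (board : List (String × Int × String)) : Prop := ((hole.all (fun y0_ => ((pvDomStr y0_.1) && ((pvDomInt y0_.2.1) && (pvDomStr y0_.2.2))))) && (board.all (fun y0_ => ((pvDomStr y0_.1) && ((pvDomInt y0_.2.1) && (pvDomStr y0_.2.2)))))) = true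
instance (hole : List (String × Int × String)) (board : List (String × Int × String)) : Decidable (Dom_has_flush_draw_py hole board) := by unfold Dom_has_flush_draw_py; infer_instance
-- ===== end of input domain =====

-- B replaces A's two Counter indexes by a per-candidate-suit rescan of hole+board with an
-- early return, looping only over the distinct hole suits; objective: simpler. Both total.

-- ===== PORT A =====
-- total = Counter(); hole_suits = Counter(s for s,_,_ in hole); two += loops; any over items
def has_flush_draw_py (hole : List (String × Int × String)) (board : List (String × Int × String)) : Bool :=
  let total : PySem.Dict String Int := PySem.Dict.empty
  let hole_suits : PySem.Dict String Int := PySem.Dict.counter (hole.map (·.1))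
  let total := hole.foldl (fun d c => d.modify c.1 0 (· + 1)) total      -- total[s] += 1
  let total := board.foldl (fun d c => d.modify c.1 0 (· + 1)) total     -- total[s] += 1
  total.items.any (fun p => decide (4 ≤ p.2) && decide (0 < hole_suits.getD p.1 0))

-- ===== PORT B =====
-- suits = {s for s,_,_ in hole}; for suit in suits: if sum(1 for s,_,_ in cards if s==suit) >= 4: return True
def has_flush_draw_py_alt (hole : List (String × Int × String)) (board : List (String × Int × String)) : Bool :=
  let suits : PySem.Set String := PySem.Set.ofList (hole.map (·.1))
  let cards := hole ++ board
  suits.any (fun suit =>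
    decide (4 ≤ ((cards.filter (fun c => c.1 == suit)).map (fun _ => (1 : Int))).sum))

-- ===== PRECONDITION & SPEC =====
def Spec_has_flush_draw_py (hole : List (String × Int × String)) (board : List (String × Int × String)) (out : Bool) : Prop := out = has_flush_draw_py_alt hole board
instance (hole : List (String × Int × String)) (board : List (String × Int × String)) (out : Bool) : Decidable (Spec_has_flush_draw_py hole board out) := by unfold Spec_has_flush_draw_py; infer_instance

-- ===== CLAIM (what is proved, stated in full; the proofs are below) =====
def Claim_equal_has_flush_draw_py : Prop := ∀ (hole : List (String × Int × String)) (board : List (String × Int × String)), Dom_has_flush_draw_py hole board → Spec_has_flush_draw_py hole board (has_flush_draw_py hole board)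

-- ===== LEMMAS AND PROOFS =====

-- folding the per-card counter update equals folding it over the projected suit list
theorem pv_foldl_fst (l : List (String × Int × String)) (d : PySem.Dict String Int) :
    l.foldl (fun d c => d.modify c.1 0 (· + 1)) d =
    (l.map (·.1)).foldl (fun d s => d.modify s 0 (· + 1)) d := by
  induction l generalizing d with
  | nil => rfl
  | cons x xs ih => simp [List.foldl_cons, ih]

-- A's 'total' dict is Counter of the suits of hole ++ board
theorem pv_total_eq (hole board : List (String × Int × String)) :
    board.foldl (fun d c => d.modify c.1 0 (· + 1))
      (hole.foldl (fun d c => d.modify c.1 0 (· + 1)) PySem.Dict.empty) =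
    PySem.Dict.counter ((hole ++ board).map (·.1)) := by
  rw [pv_foldl_fst, pv_foldl_fst, List.map_append, ← List.foldl_append]
  rfl

-- B's sum of 1s over the filtered cards is the countP of the suit
theorem pv_sum_ones (cards : List (String × Int × String)) (s : String) :
    ((cards.filter (fun c => c.1 == s)).map (fun _ => (1 : Int))).sum
      = (cards.countP (fun c => c.1 == s) : Int) := by
  simp [List.countP_eq_length_filter]

theorem pv_count_fst (cards : List (String × Int × String)) (s : String) :
    (cards.map (·.1)).count s = cards.countP (fun c => c.1 == s) := by
  simp [List.count, List.countP_map]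
  rfl

theorem pv_main (hole board : List (String × Int × String)) :
    has_flush_draw_py hole board = has_flush_draw_py_alt hole board := by
  simp only [has_flush_draw_py, has_flush_draw_py_alt, pv_total_eq]
  rw [Bool.eq_iff_iff]
  simp only [List.any_eq_true, PySem.Dict.items_counter, PySem.Dict.getD_counter,
    List.mem_map, pv_sum_ones, decide_eq_true_eq, Bool.and_eq_true]
  constructor
  · rintro ⟨x, ⟨t, ht, hx⟩, h4, hpos⟩
    subst hx
    refine ⟨t, ?_, ?_⟩
    · rw [PySem.Set.mem_ofList] at *
      exact List.count_pos_iff.mp (by exact_mod_cast hpos)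
    · rw [pv_count_fst] at h4; exact h4
  · rintro ⟨s, hs, h4⟩
    have hsH : s ∈ hole.map (·.1) := (PySem.Set.mem_ofList _ _).mp hs
    refine ⟨(s, (((hole ++ board).map (·.1)).count s : Int)), ⟨s, ?_, rfl⟩, ?_, ?_⟩
    · rw [PySem.Set.mem_ofList, List.map_append]
      exact List.mem_append_left _ hsH
    · simpa [pv_count_fst] using h4
    · exact_mod_cast List.count_pos_iff.mpr hsH

-- ===== VERDICT (by name: the statement is the Claim_ definition above) =====
theorem has_flush_draw_py_spec : Claim_equal_has_flush_draw_py := by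
  intro hole board _
  exact pv_main hole board
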